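-- pv_equiv track=rewrite | github.com/Susanreefman/LLM_Insights | generate_insights.py | interval_extract
-- ===== SOURCE A (Python) =====
-- def interval_extract(times):
--     """
--
--     Param:
--         times (list): Get interval of hours in times
--     Return:
--         insight (string): string with spray condtion insight
--     """
--
--     length = len(times)
--     i = 0
--     while i < length:
--         low = times[i]
--         while i < length - 1 and times[i] + 1 == times[i + 1]:
--             i += 1
--         high = times[i]
--         if (high - low) >= 1:
--             yield [low, high]
--         elif (high - low) == 1:
--             yield [low, ]
--             yield [high, ]
--         else:
--             yield [low, ]
--         i += 1
-- ===== SOURCE B (Python) =====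
-- from itertools import groupby
--
-- def interval_extract(times):
--     for _, grp in groupby(enumerate(times), key=lambda p: p[1] - p[0]):
--         vals = [v for _, v in grp]
--         if len(vals) > 1:
--             yield [vals[0], vals[-1]]
--         else:
--             yield [vals[0]]
-- ===== Notes on version B (the rewrite author's own statement) =====
-- stated objective: idiomatic
-- what changed: Replaces the explicit two-pointer nested-while scan with an itertools.groupby pass keyed by value-index, so each group is a maximal consecutive run.
import Mathlib
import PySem

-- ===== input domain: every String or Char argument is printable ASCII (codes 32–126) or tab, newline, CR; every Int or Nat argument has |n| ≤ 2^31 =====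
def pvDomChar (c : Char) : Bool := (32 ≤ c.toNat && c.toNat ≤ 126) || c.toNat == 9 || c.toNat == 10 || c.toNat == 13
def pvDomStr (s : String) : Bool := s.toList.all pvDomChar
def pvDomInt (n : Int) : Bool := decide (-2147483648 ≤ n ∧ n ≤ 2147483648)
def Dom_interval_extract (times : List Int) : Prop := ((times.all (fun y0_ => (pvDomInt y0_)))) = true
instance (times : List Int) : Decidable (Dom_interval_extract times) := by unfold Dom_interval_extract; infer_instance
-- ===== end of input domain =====

-- B replaces A's nested two-pointer while scan by a groupby pass keyed by value-index (idiomatic); same values everywhere.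

-- ===== PORT A =====
-- inner while: advance i while i < length-1 and times[i]+1 == times[i+1]; indices are always in range, getD 0 is exact
def innerA (times : List Int) (i : Nat) : Nat :=
  if i < times.length - 1 ∧ times.getD i 0 + 1 = times.getD (i+1) 0 then innerA times (i+1) else i
termination_by times.length - i

theorem innerA_ge (times : List Int) (i : Nat) : i ≤ innerA times i := by
  unfold innerA
  split
  · exact le_trans (Nat.le_succ i) (innerA_ge times (i+1))
  · exact le_refl i
termination_by times.length - i

-- outer while over index i, collecting the yields in order
def outerA (times : List Int) (i : Nat) : List (List Int) :=
  if h : i < times.length then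
    let low := times.getD i 0
    let j := innerA times i
    let high := times.getD j 0
    (if high - low ≥ 1 then [[low, high]]
     else if high - low = 1 then [[low], [high]]
     else [[low]]) ++ outerA times (j+1)
  else []
termination_by times.length - i
decreasing_by have := innerA_ge times i; omega

def interval_extract (times : List Int) : List (List Int) := outerA times 0

-- ===== PORT B =====
-- Python's enumerate, starting at n
def enumFrom (n : Nat) : List Int → List (Nat × Int)
  | [] => []
  | x :: xs => (n, x) :: enumFrom (n+1) xs

-- groupby's consumption of one group with key k: (values of the group, remaining pairs)
def splitRun (k : Int) : List (Nat × Int) → List Int × List (Nat × Int)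
  | [] => ([], [])
  | (i, v) :: rest =>
      if v - (i : Int) = k then
        let p := splitRun k rest
        (v :: p.1, p.2)
      else ([], (i, v) :: rest)

theorem splitRun_len (k : Int) (l : List (Nat × Int)) : (splitRun k l).2.length ≤ l.length := by
  induction l with
  | nil => simp [splitRun]
  | cons hd tl ih =>
      obtain ⟨i, v⟩ := hd
      simp only [splitRun]
      split
      · exact le_trans ih (Nat.le_succ _)
      · simp

-- groupby(enumerate(times), key = value - index): the list of groups' value lists
def groupsB : List (Nat × Int) → List (List Int)
  | [] => []
  | (i, v) :: rest =>
      let p := splitRun (v - (i : Int)) rest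
      (v :: p.1) :: groupsB p.2
termination_by l => l.length
decreasing_by have := splitRun_len (v - (i : Int)) rest; simp; omega

-- per group: [first, last] if more than one element else [first]
def emitB (g : List Int) : List Int :=
  if g.length > 1 then [g.headD 0, g.getLastD 0] else [g.headD 0]

def interval_extract_alt (times : List Int) : List (List Int) :=
  (groupsB (enumFrom 0 times)).map emitB

-- ===== PRECONDITION & SPEC =====
def Spec_interval_extract (times : List Int) (out : List (List Int)) : Prop := out = interval_extract_alt times
instance (times : List Int) (out : List (List Int)) : Decidable (Spec_interval_extract times out) := by unfold Spec_interval_extract; infer_instance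

-- ===== CLAIM (what is proved, stated in full; the proofs are below) =====
def Claim_equal_interval_extract : Prop := ∀ (times : List Int), Dom_interval_extract times → Spec_interval_extract times (interval_extract times)

-- ===== LEMMAS AND PROOFS =====

-- value-level common spec: maximal consecutive runs
def takeRun (prev : Int) : List Int → List Int × List Int
  | [] => ([], [])
  | x :: xs =>
      if x = prev + 1 then
        let p := takeRun x xs
        (x :: p.1, p.2)
      else ([], x :: xs)

theorem takeRun_len (p : Int) (l : List Int) : (takeRun p l).2.length ≤ l.length := by
  induction l generalizing p with
  | nil => simp [takeRun]
  | cons x xs ih =>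
      simp only [takeRun]
      split
      · exact le_trans (ih x) (Nat.le_succ _)
      · simp

def runsS : List Int → List (List Int)
  | [] => []
  | x :: xs =>
      let p := takeRun x xs
      (x :: p.1) :: runsS p.2
termination_by l => l.length
decreasing_by have := takeRun_len x xs; simp; omega

theorem takeRun_append (p : Int) (l : List Int) :
    (takeRun p l).1 ++ (takeRun p l).2 = l := by
  induction l generalizing p with
  | nil => simp [takeRun]
  | cons x xs ih =>
      simp only [takeRun]
      split
      · simpa using ih x
      · simp

theorem takeRun_last (p : Int) (l : List Int) :
    (p :: (takeRun p l).1).getLastD 0 = p + (takeRun p l).1.length := by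
  induction l generalizing p with
  | nil => simp [takeRun]
  | cons x xs ih =>
      simp only [takeRun]
      split
      · rename_i hx
        have := ih x
        simp only [List.getLastD_cons] at this ⊢
        rcases h : (takeRun x xs).1 with _ | ⟨a, b⟩
        · simp [h] at this ⊢; omega
        · simp [h] at this ⊢; rw [this]; push_cast; omega
      · simp

-- ===== B side =====

theorem splitRun_enum (k : Int) (xs : List Int) (n : Nat) :
    splitRun k (enumFrom (n+1) xs) =
      ((takeRun (k + n) xs).1,
       enumFrom (n + 1 + (takeRun (k + n) xs).1.length) (takeRun (k + n) xs).2) := by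
  induction xs generalizing n with
  | nil => simp [enumFrom, splitRun, takeRun]
  | cons x xs ih =>
      simp only [enumFrom, splitRun, takeRun, Nat.cast_add, Nat.cast_one]
      by_cases hx : x = k + (n : Int) + 1
      · rw [if_pos (show x - ((n : Int) + 1) = k by omega), if_pos (show x = k + (n : Int) + 1 by omega)]
        have ihn := ih (n+1)
        push_cast at ihn
        rw [show k + ((n : Int) + 1) = x from by omega] at ihn
        rw [ihn]
        have hl : n + 1 + 1 + (takeRun x xs).1.length = n + 1 + (x :: (takeRun x xs).1).length := by
          simp; omega
        rw [hl]
      · rw [if_neg (show ¬ (x - ((n : Int) + 1) = k) by omega), if_neg (show ¬ (x = k + (n : Int) + 1) by omega)]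
        simp [enumFrom]

theorem groupsB_enum (xs : List Int) : ∀ n, groupsB (enumFrom n xs) = runsS xs := by
  generalize hk : xs.length = fuel
  induction fuel using Nat.strong_induction_on generalizing xs with
  | _ fuel ih =>
  intro n
  rcases xs with _ | ⟨x, rest⟩
  · simp [enumFrom, groupsB, runsS]
  · simp only [enumFrom, groupsB, runsS]
    have hkx : x - (n : Int) + n = x := by omega
    have h := splitRun_enum (x - (n : Int)) rest n
    rw [hkx] at h
    rw [h]
    congr 1
    subst hk
    have hlen := takeRun_len x rest
    exact ih (takeRun x rest).2.length (by simp; omega) _ rfl _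

-- ===== A side =====

theorem getD_eq_headD_drop (l : List Int) (i : Nat) : l.getD i 0 = (l.drop i).headD 0 := by
  induction l generalizing i with
  | nil => simp
  | cons x xs ih =>
      cases i with
      | zero => simp
      | succ j => simpa using ih j

theorem drop_eq_cons_facts (times : List Int) (i : Nat) (x : Int) (rest : List Int)
    (h : times.drop i = x :: rest) :
    times.getD i 0 = x ∧ times.drop (i+1) = rest ∧ times.length = i + 1 + rest.length := by
  refine ⟨?_, ?_, ?_⟩
  · rw [getD_eq_headD_drop, h]; rfl
  · rw [← List.tail_drop, h]; rfl
  · have := congrArg List.length h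
    simp at this
    have hle : i ≤ times.length := by
      by_contra hc
      push_neg at hc
      rw [List.drop_eq_nil_of_le (le_of_lt hc)] at h
      simp at h
    omega

theorem innerA_char (times : List Int) : ∀ rest, ∀ i x, times.drop i = x :: rest →
    innerA times i = i + (takeRun x rest).1.length := by
  intro rest
  induction rest with
  | nil =>
      intro i x h
      obtain ⟨_, _, hlen⟩ := drop_eq_cons_facts times i x [] h
      unfold innerA
      rw [if_neg]
      · simp [takeRun]
      · simp at hlen ⊢
        omega
  | cons y ys ih =>
      intro i x h
      obtain ⟨hg, hd, hlen⟩ := drop_eq_cons_facts times i x (y :: ys) h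
      obtain ⟨hg2, _, _⟩ := drop_eq_cons_facts times (i+1) y ys hd
      unfold innerA
      by_cases hy : y = x + 1
      · rw [if_pos ⟨by simp at hlen ⊢; omega, by rw [hg, hg2]; omega⟩]
        rw [ih (i+1) y hd]
        simp only [takeRun, if_pos hy]
        simp
        omega
      · rw [if_neg]
        · simp [takeRun, hy]
        · rintro ⟨_, hc⟩
          rw [hg, hg2] at hc
          omega

theorem drop_group (x : Int) (g r : List Int) (times : List Int) (i : Nat)
    (h : times.drop i = x :: (g ++ r)) :
    times.getD (i + g.length) 0 = (x :: g).getLastD 0 ∧ times.drop (i + g.length + 1) = r := by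
  induction g generalizing i x with
  | nil =>
      obtain ⟨hg, hd, _⟩ := drop_eq_cons_facts times i x r (by simpa using h)
      simpa using ⟨hg, hd⟩
  | cons a g' ih =>
      obtain ⟨_, hd, _⟩ := drop_eq_cons_facts times i x (a :: (g' ++ r)) (by simpa using h)
      have := ih a (i+1) hd
      constructor
      · rw [show i + (a :: g').length = (i+1) + g'.length by simp; omega]
        rw [this.1]
        simp [List.getLastD_cons]
      · rw [show i + (a :: g').length + 1 = (i+1) + g'.length + 1 by simp; omega]
        exact this.2

theorem outerA_runs (times : List Int) : ∀ i, outerA times i = (runsS (times.drop i)).map emitB := by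
  intro i
  generalize hk : times.length - i = k
  induction k using Nat.strong_induction_on generalizing i with
  | _ k ih =>
  unfold outerA
  split
  · rename_i hi
    obtain ⟨x, rest, hdrop⟩ : ∃ x rest, times.drop i = x :: rest := by
      rcases h : times.drop i with _ | ⟨x, rest⟩
      · exfalso
        have := congrArg List.length h
        simp at this
        omega
      · exact ⟨x, rest, rfl⟩
    obtain ⟨hg, hdtail, hlen⟩ := drop_eq_cons_facts times i x rest hdrop
    have hin := innerA_char times rest i x hdrop
    have hdropG : times.drop i = x :: ((takeRun x rest).1 ++ (takeRun x rest).2) := by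
      rw [hdrop, takeRun_append]
    obtain ⟨hhigh, hdrop2⟩ := drop_group x _ _ times i hdropG
    have hlast := takeRun_last x rest
    have hge := innerA_ge times i
    have hrec := ih (times.length - (innerA times i + 1)) (by omega) (innerA times i + 1) rfl
    have hruns : runsS (x :: rest) = (x :: (takeRun x rest).1) :: runsS (takeRun x rest).2 := by
      simp [runsS]
    rw [hdrop, hruns, List.map_cons]
    show (if times.getD (innerA times i) 0 - times.getD i 0 ≥ 1 then
            [[times.getD i 0, times.getD (innerA times i) 0]]
          else if times.getD (innerA times i) 0 - times.getD i 0 = 1 then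
            [[times.getD i 0], [times.getD (innerA times i) 0]]
          else [[times.getD i 0]]) ++ outerA times (innerA times i + 1) =
        emitB (x :: (takeRun x rest).1) :: List.map emitB (runsS (takeRun x rest).2)
    rw [hrec, hin, hdrop2]
    have hyield :
        (if times.getD (i + (takeRun x rest).1.length) 0 - times.getD i 0 ≥ 1 then
           [[times.getD i 0, times.getD (i + (takeRun x rest).1.length) 0]]
         else if times.getD (i + (takeRun x rest).1.length) 0 - times.getD i 0 = 1 then
           [[times.getD i 0], [times.getD (i + (takeRun x rest).1.length) 0]]
         else [[times.getD i 0]]) = [emitB (x :: (takeRun x rest).1)] := by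
      rw [hg, hhigh]
      rcases hG : (takeRun x rest).1 with _ | ⟨a, g'⟩
      · simp [emitB]
      · rw [hG] at hlast
        have hgt : (x :: a :: g').getLastD 0 - x ≥ 1 := by
          rw [hlast]
          simp
        rw [if_pos hgt]
        simp [emitB]
    rw [hyield]
    simp
  · rename_i hi
    rw [List.drop_eq_nil_of_le (by omega)]
    simp [runsS]

-- ===== VERDICT (by name: the statement is the Claim_ definition above) =====
theorem interval_extract_spec : Claim_equal_interval_extract := by
  intro times _
  unfold Spec_interval_extract interval_extract interval_extract_alt
  rw [groupsB_enum times 0, outerA_runs times 0]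
  simp
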